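-- pv_equiv track=rewrite | github.com/AdamZhouSE/pythonHomework | Code/CodeRecords/2897/60719/274600.py | hasSame
-- ===== SOURCE A (Python) =====
-- def hasSame(a, b):
--     a = list(a)
--     b = list(b)
--     a.sort()
--     b.sort()
--     x = y = 2
--     res = False
--     while x < len(a) and y < len(b):
--         if a[x] == b[y]:
--             res = True
--             break
--         elif a[x] < b[y]:
--             x = x + 1
--         elif a[x] > b[y]:
--             y = y + 1
--
--     return res
-- ===== SOURCE B (Python) =====
-- def hasSame(a, b):
--     # Drop the two smallest elements (by multiplicity) of each list, then
--     # test whether the remainders share any value via a set intersection.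
--     def rest(xs):
--         xs = list(xs)
--         for _ in range(min(2, len(xs))):
--             xs.remove(min(xs))
--         return xs
--     return bool(set(rest(a)) & set(rest(b)))
-- ===== Notes on version B (the rewrite author's own statement) =====
-- stated objective: alternative
-- what changed: Instead of sorting both lists and running a two-pointer merge from index 2, B removes the two smallest elements of each list directly and tests the remainders for a common value with a hash-set intersection, avoiding the sort.
import Mathlib
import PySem

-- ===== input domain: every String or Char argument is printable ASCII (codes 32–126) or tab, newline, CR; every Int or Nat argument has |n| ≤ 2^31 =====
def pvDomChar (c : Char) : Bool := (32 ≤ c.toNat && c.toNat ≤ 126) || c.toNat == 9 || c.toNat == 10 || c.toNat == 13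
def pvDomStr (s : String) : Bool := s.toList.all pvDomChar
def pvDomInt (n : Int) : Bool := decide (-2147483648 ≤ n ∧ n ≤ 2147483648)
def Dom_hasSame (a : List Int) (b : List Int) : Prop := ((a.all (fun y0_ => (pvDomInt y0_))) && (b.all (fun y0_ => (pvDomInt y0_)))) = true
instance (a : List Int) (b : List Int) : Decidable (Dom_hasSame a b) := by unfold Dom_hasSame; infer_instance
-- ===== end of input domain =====

-- B drops the two smallest elements of each list directly and intersects the remainders as
-- sets, instead of A's sort-both-then-two-pointer merge starting at index 2 (alternative algorithm).

-- ===== PORT A =====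
-- the while loop: indices x, y walk the two sorted lists
def hasSameLoop (sa sb : List Int) (x y : Nat) : Bool :=
  if h : x < sa.length ∧ y < sb.length then
    if sa[x]'h.1 = sb[y]'h.2 then true
    else if sa[x]'h.1 < sb[y]'h.2 then hasSameLoop sa sb (x + 1) y
    else hasSameLoop sa sb x (y + 1)   -- here the 'a[x] > b[y]' test always holds for ints
  else false
termination_by (sa.length - x) + (sb.length - y)
decreasing_by all_goals omega

def hasSame (a : List Int) (b : List Int) : Bool :=
  hasSameLoop (PySem.List.sorted a (fun v => v)) (PySem.List.sorted b (fun v => v)) 2 2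

-- ===== PORT B =====
-- one iteration of rest's loop body: xs.remove(min(xs))
def pyRemoveMin (xs : List Int) : List Int :=
  match PySem.List.min? xs (fun v => v) with
  | some m => (PySem.List.remove? xs m).getD xs   -- min(xs) ∈ xs, so remove? is some
  | none => xs

-- rest(xs): for _ in range(min(2, len(xs))): xs.remove(min(xs))
def restTwo (xs : List Int) : List Int :=
  (PySem.List.pyRange 0 (min 2 (PySem.List.len xs)) 1).foldl (fun acc _ => pyRemoveMin acc) xs

def hasSame_alt (a : List Int) (b : List Int) : Bool :=
  !(PySem.Set.inter (PySem.Set.ofList (restTwo a)) (PySem.Set.ofList (restTwo b))).isEmpty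

-- ===== PRECONDITION & SPEC =====
def Spec_hasSame (a : List Int) (b : List Int) (out : Bool) : Prop := out = hasSame_alt a b
instance (a : List Int) (b : List Int) (out : Bool) : Decidable (Spec_hasSame a b out) := by unfold Spec_hasSame; infer_instance

-- ===== CLAIM (what is proved, stated in full; the proofs are below) =====
def Claim_equal_hasSame : Prop := ∀ (a : List Int) (b : List Int), Dom_hasSame a b → Spec_hasSame a b (hasSame a b)

-- ===== LEMMAS AND PROOFS =====

-- on a sorted list every element of the suffix starting at x is ≥ the element at x
theorem drop_head_le (l : List Int) (hl : l.Pairwise (· ≤ ·)) (x : Nat) (hx : x < l.length)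
    (v : Int) (hv : v ∈ l.drop x) : l[x] ≤ v := by
  have h1 : l.drop x = l[x] :: l.drop (x+1) := List.drop_eq_getElem_cons hx
  rw [h1, List.mem_cons] at hv
  rcases hv with hv | hv
  · exact hv.ge
  · have h2 : List.Sublist (l[x] :: l.drop (x+1)) l := h1 ▸ List.drop_sublist x l
    exact List.pairwise_iff_forall_sublist.mp hl
      ((List.cons_sublist_cons.mpr (List.singleton_sublist.mpr hv)).trans h2)

theorem mem_drop_succ_of_ne (l : List Int) (x : Nat) (hx : x < l.length)
    (v : Int) (hv : v ∈ l.drop x) (hne : v ≠ l[x]) : v ∈ l.drop (x+1) := by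
  rw [List.drop_eq_getElem_cons hx, List.mem_cons] at hv
  rcases hv with hv | hv
  · exact absurd hv hne
  · exact hv

theorem mem_drop_of_succ (l : List Int) (x : Nat) (hx : x < l.length)
    (v : Int) (hv : v ∈ l.drop (x+1)) : v ∈ l.drop x := by
  rw [List.drop_eq_getElem_cons hx]; exact List.mem_cons_of_mem _ hv

-- A's merge loop returns true iff the two suffixes share an element (on sorted lists)
theorem hasSameLoop_iff (sa sb : List Int)
    (ha : sa.Pairwise (· ≤ ·)) (hb : sb.Pairwise (· ≤ ·)) (x y : Nat) :
    hasSameLoop sa sb x y = true ↔ ∃ v, v ∈ sa.drop x ∧ v ∈ sb.drop y := by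
  fun_induction hasSameLoop sa sb x y with
  | case1 x y h heq =>
    constructor
    · intro _
      refine ⟨sa[x]'h.1, ?_, ?_⟩
      · rw [List.drop_eq_getElem_cons h.1]; exact List.mem_cons_self
      · rw [heq, List.drop_eq_getElem_cons h.2]; exact List.mem_cons_self
    · intro _; rfl
  | case2 x y h hne hlt ih =>
    rw [ih]
    constructor
    · rintro ⟨v, hva, hvb⟩
      exact ⟨v, mem_drop_of_succ sa x h.1 v hva, hvb⟩
    · rintro ⟨v, hva, hvb⟩
      refine ⟨v, mem_drop_succ_of_ne sa x h.1 v hva ?_, hvb⟩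
      intro hveq
      have := drop_head_le sb hb y h.2 v hvb
      omega
  | case3 x y h hne hnlt ih =>
    rw [ih]
    constructor
    · rintro ⟨v, hva, hvb⟩
      exact ⟨v, hva, mem_drop_of_succ sb y h.2 v hvb⟩
    · rintro ⟨v, hva, hvb⟩
      refine ⟨v, hva, mem_drop_succ_of_ne sb y h.2 v hvb ?_⟩
      intro hveq
      have := drop_head_le sa ha x h.1 v hva
      omega
  | case4 x y h =>
    simp only [Bool.false_eq_true, false_iff]
    rintro ⟨v, hva, hvb⟩
    rcases not_and_or.mp h with h' | h'
    · rw [List.drop_eq_nil_of_le (by omega)] at hva; exact absurd hva (List.not_mem_nil)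
    · rw [List.drop_eq_nil_of_le (by omega)] at hvb; exact absurd hvb (List.not_mem_nil)

-- removing the minimum respects permutation (the minimum VALUE is permutation-invariant)
theorem pyRemoveMin_perm {xs ys : List Int} (h : xs.Perm ys) :
    (pyRemoveMin xs).Perm (pyRemoveMin ys) := by
  unfold pyRemoveMin
  cases hx : PySem.List.min? xs (fun v => v) with
  | none =>
    have : xs = [] := (PySem.List.min?_eq_none_iff xs _).mp hx
    subst this
    have : ys = [] := h.nil_eq.symm
    subst this
    simp [PySem.List.min?]
  | some m =>
    have hymem : ys ≠ [] := by
      intro hy; subst hy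
      have : xs = [] := h.eq_nil
      simp [this, PySem.List.min?] at hx
    cases hy : PySem.List.min? ys (fun v => v) with
    | none => exact absurd ((PySem.List.min?_eq_none_iff ys _).mp hy) hymem
    | some m' =>
      have hm : m = m' := by
        have h1 := PySem.List.min?_mem hx
        have h2 := PySem.List.min?_mem hy
        have h3 := PySem.List.min?_isMin hx (y := m') (h.mem_iff.mpr h2)
        have h4 := PySem.List.min?_isMin hy (y := m) (h.mem_iff.mp h1)
        exact le_antisymm h3 h4
      subst hm
      show ((PySem.List.remove? xs m).getD xs).Perm ((PySem.List.remove? ys m).getD ys)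
      rw [PySem.List.remove?_eq_some_erase xs m (PySem.List.min?_mem hx),
          PySem.List.remove?_eq_some_erase ys m (h.mem_iff.mp (PySem.List.min?_mem hx)),
          Option.getD_some, Option.getD_some]
      exact h.erase m

theorem foldl_min_of_le (x : Int) (t : List Int) (h : ∀ y ∈ t, x ≤ y) :
    t.foldl min x = x := by
  induction t generalizing x with
  | nil => rfl
  | cons a t ih =>
    rw [List.foldl_cons, min_eq_left (h a List.mem_cons_self)]
    exact ih x (fun y hy => h y (List.mem_cons_of_mem _ hy))

-- on an already-sorted list, removing the minimum removes the head
theorem pyRemoveMin_sorted (s : List Int) (hs : s.Pairwise (· ≤ ·)) :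
    pyRemoveMin s = s.tail := by
  unfold pyRemoveMin
  cases s with
  | nil => simp [PySem.List.min?]
  | cons m t =>
    rw [PySem.List.min?_id_cons,
        foldl_min_of_le m t (List.pairwise_cons.mp hs).1]
    show (PySem.List.remove? (m :: t) m).getD (m :: t) = t
    rw [PySem.List.remove?_cons_self, Option.getD_some]

-- the range(min(2, len(xs))) loop is just two applications of pyRemoveMin
theorem restTwo_eq (xs : List Int) : restTwo xs = pyRemoveMin (pyRemoveMin xs) := by
  unfold restTwo
  match xs with
  | [] => simp [PySem.List.len_eq, PySem.List.pyRange, pyRemoveMin, PySem.List.min?]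
  | [v] =>
    have h1 : min 2 (PySem.List.len [v]) = 1 := by simp [PySem.List.len_eq]
    rw [h1]
    show ([(0:Int)].foldl (fun acc _ => pyRemoveMin acc) [v]) = _
    have h2 : pyRemoveMin [v] = [] := by
      simp [pyRemoveMin, PySem.List.min?, PySem.List.remove?]
    simp [h2]
    simp [pyRemoveMin, PySem.List.min?]
  | a :: b :: t =>
    have h1 : min 2 (PySem.List.len (a :: b :: t)) = 2 := by
      simp [PySem.List.len_eq]; omega
    rw [h1]
    show ([(0:Int),1].foldl (fun acc _ => pyRemoveMin acc) (a :: b :: t)) = _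
    simp [List.foldl]

-- B's remainder is a permutation of the sorted list with its first two elements dropped
theorem restTwo_perm_drop (xs : List Int) :
    (restTwo xs).Perm ((PySem.List.sorted xs (fun v => v)).drop 2) := by
  set s := PySem.List.sorted xs (fun v => v) with hs
  have hperm : xs.Perm s := (PySem.List.sorted_perm xs (fun v => v) false).symm
  have hpw : s.Pairwise (· ≤ ·) := PySem.List.sorted_pairwise xs (fun v => v)
  have h1 : (pyRemoveMin xs).Perm s.tail := by
    rw [← pyRemoveMin_sorted s hpw]; exact pyRemoveMin_perm hperm
  have h2 : (pyRemoveMin (pyRemoveMin xs)).Perm s.tail.tail := by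
    rw [← pyRemoveMin_sorted s.tail (hpw.sublist (List.tail_sublist s))]
    exact pyRemoveMin_perm h1
  rw [restTwo_eq]
  have : s.drop 2 = s.tail.tail := by
    rw [← List.drop_one, ← List.drop_one, List.drop_drop]
  rw [this]
  exact h2

-- B returns true iff the two remainders share an element
theorem hasSame_alt_iff (a b : List Int) :
    hasSame_alt a b = true ↔ ∃ v, v ∈ restTwo a ∧ v ∈ restTwo b := by
  unfold hasSame_alt
  rw [Bool.not_eq_true', List.isEmpty_eq_false_iff_exists_mem]
  constructor
  · rintro ⟨v, hv⟩
    rw [PySem.Set.mem_inter] at hv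
    exact ⟨v, (PySem.Set.mem_ofList _ _).mp hv.1, (PySem.Set.mem_ofList _ _).mp hv.2⟩
  · rintro ⟨v, h1, h2⟩
    exact ⟨v, (PySem.Set.mem_inter _ _ _).mpr ⟨(PySem.Set.mem_ofList _ _).mpr h1, (PySem.Set.mem_ofList _ _).mpr h2⟩⟩

-- ===== VERDICT (by name: the statement is the Claim_ definition above) =====
theorem hasSame_spec : Claim_equal_hasSame := by
  intro a b _
  unfold Spec_hasSame
  rw [Bool.eq_iff_iff, hasSame_alt_iff]
  unfold hasSame
  rw [hasSameLoop_iff _ _ (PySem.List.sorted_pairwise a (fun v => v))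
        (PySem.List.sorted_pairwise b (fun v => v))]
  constructor
  · rintro ⟨v, hva, hvb⟩
    exact ⟨v, (restTwo_perm_drop a).mem_iff.mpr hva, (restTwo_perm_drop b).mem_iff.mpr hvb⟩
  · rintro ⟨v, hva, hvb⟩
    exact ⟨v, (restTwo_perm_drop a).mem_iff.mp hva, (restTwo_perm_drop b).mem_iff.mp hvb⟩
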